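-- pv_equiv track=rewrite | github.com/XcapeAxis/BalatroAI | trainer/experiments/release_notes.py | _capabilities_from_commits
-- ===== SOURCE A (Python) =====
-- def _capabilities_from_commits(commits: list[dict[str, str]]) -> list[str]:
--     hints: list[str] = []
--     for c in commits:
--         subject = str(c.get("subject") or "").strip()
--         s = subject.lower()
--         if not subject:
--             continue
--         if any(k in s for k in ("trend", "warehouse", "benchmark")):
--             hints.append(subject)
--         elif any(k in s for k in ("regression", "alert", "flake", "risk")):
--             hints.append(subject)
--         elif any(k in s for k in ("release", "notes", "summary")):
--             hints.append(subject)
--         elif any(k in s for k in ("nightly", "scheduler", "run_p26")):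
--             hints.append(subject)
--         elif any(k in s for k in ("spec", "readme", "docs")):
--             hints.append(subject)
--     # keep order, unique
--     dedup: list[str] = []
--     seen: set[str] = set()
--     for h in hints:
--         if h in seen:
--             continue
--         seen.add(h)
--         dedup.append(h)
--     return dedup[:20]
-- ===== SOURCE B (Python) =====
-- _KEYWORDS = (
--     "trend", "warehouse", "benchmark",
--     "regression", "alert", "flake", "risk",
--     "release", "notes", "summary",
--     "nightly", "scheduler", "run_p26",
--     "spec", "readme", "docs",
-- )
--
--
-- def _capabilities_from_commits(commits: list[dict[str, str]]) -> list[str]: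
--     out: list[str] = []
--     seen: set[str] = set()
--     for c in commits:
--         if len(out) >= 20:
--             break
--         subject = str(c.get("subject") or "").strip()
--         if not subject or subject in seen:
--             continue
--         s = subject.lower()
--         if any(k in s for k in _KEYWORDS):
--             seen.add(subject)
--             out.append(subject)
--     return out
-- ===== Notes on version B (the rewrite author's own statement) =====
-- stated objective: simpler
-- what changed: The five identical elif branches collapse into one membership test against the union keyword tuple, and the filter pass plus the separate dedup pass are fused into a single loop that maintains a seen set and stops as soon as 20 unique matching subjects are collected.
import Mathlib
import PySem

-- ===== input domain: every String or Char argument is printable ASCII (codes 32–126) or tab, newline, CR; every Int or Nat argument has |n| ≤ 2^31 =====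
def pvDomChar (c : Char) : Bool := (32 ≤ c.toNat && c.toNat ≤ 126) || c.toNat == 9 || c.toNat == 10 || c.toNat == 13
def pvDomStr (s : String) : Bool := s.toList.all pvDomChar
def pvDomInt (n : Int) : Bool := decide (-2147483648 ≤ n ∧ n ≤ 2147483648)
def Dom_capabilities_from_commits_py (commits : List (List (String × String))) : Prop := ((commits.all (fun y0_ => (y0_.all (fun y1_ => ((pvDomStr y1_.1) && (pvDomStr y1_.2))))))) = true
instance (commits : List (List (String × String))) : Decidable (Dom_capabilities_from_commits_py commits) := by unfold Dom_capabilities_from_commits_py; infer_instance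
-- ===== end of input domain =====

-- B collapses A's five identical elif branches into one membership test over the union keyword
-- list and fuses A's filter pass and dedup pass into one loop with a seen-set and an early
-- break at 20 unique subjects (objective: simpler); return values agree on all inputs.

-- ===== PORT A =====
-- subject = str(c.get("subject") or "").strip()  ('or ""' maps both a missing key and "" to "")
def pvSubject (c : List (String × String)) : String :=
  PySem.Str.strip (((PySem.Dict.mk c).get? "subject").getD "")

def capabilities_from_commits_py (commits : List (List (String × String))) : List String :=
  let hints : List String := commits.foldl (fun hints c =>
    let subject := pvSubject c
    let s := PySem.Str.lower subject
    if subject = "" then hints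
    else if (["trend", "warehouse", "benchmark"].any fun k => PySem.Str.isIn k s) then
      hints ++ [subject]
    else if (["regression", "alert", "flake", "risk"].any fun k => PySem.Str.isIn k s) then
      hints ++ [subject]
    else if (["release", "notes", "summary"].any fun k => PySem.Str.isIn k s) then
      hints ++ [subject]
    else if (["nightly", "scheduler", "run_p26"].any fun k => PySem.Str.isIn k s) then
      hints ++ [subject]
    else if (["spec", "readme", "docs"].any fun k => PySem.Str.isIn k s) then
      hints ++ [subject]
    else hints) []
  let dd := hints.foldl (fun (p : PySem.Set String × List String) h =>
    if p.1.contains h then p else (p.1.add h, p.2 ++ [h])) (PySem.Set.empty, [])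
  PySem.List.slice dd.2 none (some 20)

-- ===== PORT B =====
def pvKeywords : List String :=
  ["trend", "warehouse", "benchmark",
   "regression", "alert", "flake", "risk",
   "release", "notes", "summary",
   "nightly", "scheduler", "run_p26",
   "spec", "readme", "docs"]

def pvAltGo (commits : List (List (String × String))) (seen : PySem.Set String)
    (out : List String) : List String :=
  match commits with
  | [] => out
  | c :: rest =>
    if 20 ≤ out.length then out
    else
      let subject := pvSubject c
      if subject = "" ∨ seen.contains subject then pvAltGo rest seen out
      else
        let s := PySem.Str.lower subject
        if pvKeywords.any (fun k => PySem.Str.isIn k s) then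
          pvAltGo rest (seen.add subject) (out ++ [subject])
        else pvAltGo rest seen out

def capabilities_from_commits_py_alt (commits : List (List (String × String))) : List String :=
  pvAltGo commits PySem.Set.empty []

-- ===== PRECONDITION & SPEC =====
def Spec_capabilities_from_commits_py (commits : List (List (String × String))) (out : List String) : Prop := out = capabilities_from_commits_py_alt commits
instance (commits : List (List (String × String))) (out : List String) : Decidable (Spec_capabilities_from_commits_py commits out) := by unfold Spec_capabilities_from_commits_py; infer_instance

-- ===== CLAIM (what is proved, stated in full; the proofs are below) =====
def Claim_equal_capabilities_from_commits_py : Prop := ∀ (commits : List (List (String × String))), Dom_capabilities_from_commits_py commits → Spec_capabilities_from_commits_py commits (capabilities_from_commits_py commits)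

-- ===== LEMMAS AND PROOFS =====

-- proof-only: does a commit's subject survive A's branch cascade / B's single test?
def pvMatch (c : List (String × String)) : Bool :=
  !(pvSubject c == "") &&
    (pvKeywords.any fun k => PySem.Str.isIn k (PySem.Str.lower (pvSubject c)))

-- the matching subjects, in order (characterisation of A's first loop)
def pvMatches (commits : List (List (String × String))) : List String :=
  (commits.filter pvMatch).map pvSubject

-- first-occurrence dedup skipping an initial seen-set (characterisation of A's second loop)
def pvDedup (seen : PySem.Set String) : List String → List String
  | [] => []
  | h :: t => if seen.contains h then pvDedup seen t else h :: pvDedup (seen.add h) t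

-- A's five-way elif cascade appends exactly when the union test fires
theorem pvBodyA (hints : List String) (c : List (String × String)) :
    (let subject := pvSubject c
     let s := PySem.Str.lower subject
     if subject = "" then hints
     else if (["trend", "warehouse", "benchmark"].any fun k => PySem.Str.isIn k s) then
       hints ++ [subject]
     else if (["regression", "alert", "flake", "risk"].any fun k => PySem.Str.isIn k s) then
       hints ++ [subject]
     else if (["release", "notes", "summary"].any fun k => PySem.Str.isIn k s) then
       hints ++ [subject]
     else if (["nightly", "scheduler", "run_p26"].any fun k => PySem.Str.isIn k s) then
       hints ++ [subject]
     else if (["spec", "readme", "docs"].any fun k => PySem.Str.isIn k s) then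
       hints ++ [subject]
     else hints)
    = if pvMatch c then hints ++ [pvSubject c] else hints := by
  by_cases he : pvSubject c = ""
  · have hm : pvMatch c = false := by
      simp only [pvMatch, he]
      simp
    simp only [he, if_true, hm, Bool.false_eq_true, if_false]
  · have hbe : (pvSubject c == "") = false := by simp [he]
    have hU : pvMatch c
        = ((["trend", "warehouse", "benchmark"].any fun k => PySem.Str.isIn k (PySem.Str.lower (pvSubject c)))
          || ((["regression", "alert", "flake", "risk"].any fun k => PySem.Str.isIn k (PySem.Str.lower (pvSubject c)))
          || ((["release", "notes", "summary"].any fun k => PySem.Str.isIn k (PySem.Str.lower (pvSubject c)))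
          || ((["nightly", "scheduler", "run_p26"].any fun k => PySem.Str.isIn k (PySem.Str.lower (pvSubject c)))
          || (["spec", "readme", "docs"].any fun k => PySem.Str.isIn k (PySem.Str.lower (pvSubject c))))))) := by
      simp only [pvMatch, hbe, Bool.not_false, Bool.true_and, pvKeywords,
        List.any_cons, List.any_nil, Bool.or_false, Bool.or_assoc]
    simp only [he, if_false, hU]
    cases h1 : (["trend", "warehouse", "benchmark"].any fun k => PySem.Str.isIn k (PySem.Str.lower (pvSubject c))) <;>
      cases h2 : (["regression", "alert", "flake", "risk"].any fun k => PySem.Str.isIn k (PySem.Str.lower (pvSubject c))) <;>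
        cases h3 : (["release", "notes", "summary"].any fun k => PySem.Str.isIn k (PySem.Str.lower (pvSubject c))) <;>
          cases h4 : (["nightly", "scheduler", "run_p26"].any fun k => PySem.Str.isIn k (PySem.Str.lower (pvSubject c))) <;>
            cases h5 : (["spec", "readme", "docs"].any fun k => PySem.Str.isIn k (PySem.Str.lower (pvSubject c))) <;>
              simp

theorem pvHints_eq (commits : List (List (String × String))) (acc : List String) :
    commits.foldl (fun hints c =>
      let subject := pvSubject c
      let s := PySem.Str.lower subject
      if subject = "" then hints
      else if (["trend", "warehouse", "benchmark"].any fun k => PySem.Str.isIn k s) then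
        hints ++ [subject]
      else if (["regression", "alert", "flake", "risk"].any fun k => PySem.Str.isIn k s) then
        hints ++ [subject]
      else if (["release", "notes", "summary"].any fun k => PySem.Str.isIn k s) then
        hints ++ [subject]
      else if (["nightly", "scheduler", "run_p26"].any fun k => PySem.Str.isIn k s) then
        hints ++ [subject]
      else if (["spec", "readme", "docs"].any fun k => PySem.Str.isIn k s) then
        hints ++ [subject]
      else hints) acc = acc ++ pvMatches commits := by
  induction commits generalizing acc with
  | nil => simp [pvMatches]
  | cons c rest ih =>
    rw [List.foldl_cons, pvBodyA acc c]
    cases hm : pvMatch c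
    · rw [if_neg (by simp), ih]
      simp only [pvMatches]
      rw [List.filter_cons_of_neg (by simp [hm])]
    · rw [if_pos (by simp), ih]
      simp only [pvMatches]
      rw [List.filter_cons_of_pos (by simp [hm]), List.map_cons, List.append_assoc]
      rfl

theorem pvDedupFold_eq (hints : List String) (seen : PySem.Set String) (acc : List String) :
    (hints.foldl (fun (p : PySem.Set String × List String) h =>
      if p.1.contains h then p else (p.1.add h, p.2 ++ [h])) (seen, acc)).2
      = acc ++ pvDedup seen hints := by
  induction hints generalizing seen acc with
  | nil => simp [pvDedup]
  | cons h t ih =>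
    rw [List.foldl_cons, pvDedup]
    by_cases hc : seen.contains h = true
    · rw [if_pos hc, if_pos hc, ih]
    · rw [if_neg hc, if_neg hc, ih, List.append_assoc]
      rfl

theorem pvAltGo_eq (commits : List (List (String × String))) (seen : PySem.Set String)
    (out : List String) (hlen : out.length ≤ 20) :
    pvAltGo commits seen out
      = out ++ (pvDedup seen (pvMatches commits)).take (20 - out.length) := by
  induction commits generalizing seen out with
  | nil => simp [pvAltGo, pvMatches, pvDedup]
  | cons c rest ih =>
    simp only [pvAltGo]
    by_cases h20 : 20 ≤ out.length
    · have h : out.length = 20 := le_antisymm hlen h20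
      rw [if_pos h20, h]
      simp only [Nat.sub_self, List.take_zero, List.append_nil]
    · rw [if_neg h20]
      by_cases he : pvSubject c = ""
      · have hm : pvMatch c = false := by simp [pvMatch, he]
        rw [if_pos (Or.inl he), ih seen out hlen]
        simp only [pvMatches]
        rw [List.filter_cons_of_neg (by simp [hm])]
      · have hbe : (pvSubject c == "") = false := by simp [he]
        by_cases hk : (pvKeywords.any fun k => PySem.Str.isIn k (PySem.Str.lower (pvSubject c))) = true
        · have hm : pvMatch c = true := by rw [pvMatch, hbe, hk]; rfl
          by_cases hs : seen.contains (pvSubject c) = true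
          · rw [if_pos (Or.inr hs), ih seen out hlen]
            simp only [pvMatches]
            rw [List.filter_cons_of_pos (by simp [hm]), List.map_cons, pvDedup,
              if_pos hs]
          · have hl2 : (out ++ [pvSubject c]).length ≤ 20 := by
              simp only [List.length_append, List.length_cons, List.length_nil]
              omega
            rw [if_neg (by rintro (h | h); exact he h; exact hs h), if_pos hk,
              ih (seen.add (pvSubject c)) (out ++ [pvSubject c]) hl2]
            simp only [pvMatches]
            rw [List.filter_cons_of_pos (by simp [hm]), List.map_cons, pvDedup,
              if_neg hs]
            have htk : 20 - out.length = (20 - (out ++ [pvSubject c]).length) + 1 := by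
              simp only [List.length_append, List.length_cons, List.length_nil]
              omega
            rw [htk, List.take_succ_cons, List.append_assoc]
            rfl
        · have hkf : (pvKeywords.any fun k => PySem.Str.isIn k (PySem.Str.lower (pvSubject c))) = false := by
            rwa [Bool.not_eq_true] at hk
          have hm : pvMatch c = false := by rw [pvMatch, hkf, Bool.and_false]
          have hrest : pvDedup seen (pvMatches (c :: rest)) = pvDedup seen (pvMatches rest) := by
            simp only [pvMatches]
            rw [List.filter_cons_of_neg (by simp [hm])]
          by_cases hs : seen.contains (pvSubject c) = true
          · rw [if_pos (Or.inr hs), ih seen out hlen, hrest]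
          · rw [if_neg (by rintro (h | h); exact he h; exact hs h), if_neg hk,
              ih seen out hlen, hrest]

theorem pvSlice20 (xs : List String) : PySem.List.slice xs none (some 20) = xs.take 20 := by
  have h := PySem.List.slice_to_natCast (xs := xs) (b := 20)
  norm_num at h
  exact h

-- ===== VERDICT (by name: the statement is the Claim_ definition above) =====
theorem capabilities_from_commits_py_spec : Claim_equal_capabilities_from_commits_py := by
  intro commits _
  unfold Spec_capabilities_from_commits_py
  simp only [capabilities_from_commits_py, capabilities_from_commits_py_alt]
  rw [pvHints_eq commits [], pvDedupFold_eq, pvSlice20,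
    pvAltGo_eq commits PySem.Set.empty [] (by simp)]
  simp
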